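/- GENERATED by tools/from_farm_form.py from prooffarm-gif/accepted/DGifGetLine.2/Proof.lean (a worked proof of the farm's unit `DGifGetLine.2`,
   accepted by the verdict) — do not edit. -/
import Gif.Spec.Units.DGifGetLine_2
import Gif.Spec.AllSegs
import Gif.Spec.Proved.DGifGetLine_2_Lemmas

open X86 X86.User Asan ProgX.Base ProgX.Base.Spec Gif.Spec

/-!
  `DGifGetLine.2` (0x10a2c4 … 0x10a2ea and 0x10a305 … 0x10a314, 16 instructions; dgif_lib.c:504-505, 518, 520): A BODY SEGMENT OF A
  PROTECTED FUNCTION WITH A CONTRACT CALL IN THE MIDDLE. The return address 0x10a2d2 (`ret7`) of the call of DGifDecompressLine is not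
  a cut of the design, so the unit makes it one of its own: the private assertion `gl2_AtRet7` (`Body` + `r14 = Private` + the
  result in `rax`) and two walks (Lemmas.lean), chained here.
-/

namespace Gif.Spec.DGifGetLine_2

end Gif.Spec.DGifGetLine_2

/-- Segment 2 of `DGifGetLine` takes `AtCall` at 0x10a2c4 to `Head` at 0x10a2ea or to `Done` at 0x10a28e. -/
theorem Gif.Spec.Proved.DGifGetLine_2_ok : Gif.Spec.DGifGetLine_2.Statement := by
  intro Lay hLay μ hμ u₀ hcode h_DGifDecompressLine h_asan_load8_noabort H rest frames F R n e ret v hat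
  -- the callee's contract for the frame list of the body (the own frame in front) and the line length `n`
  have hdl := h_DGifDecompressLine H rest (DGifGetLine.framesIn frames e) F R n
  -- 0x10a2c4 … the call of DGifDecompressLine (dgif_lib.c:504) … 0x10a2d2
  refine (Gif.Spec.DGifGetLine_2.gl2_seg_call Lay hLay μ hμ u₀ hcode H rest frames F R n e ret hdl v hat).trans ?_
  -- 0x10a2d2 … 0x10a2ea (the head of the flush loop) | 0x10a28e (the epilogue)
  intro v1 hv1
  exact Gif.Spec.DGifGetLine_2.gl2_seg_tail Lay hLay μ hμ u₀ hcode H rest frames F R n e ret h_asan_load8_noabort v1 hv1
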